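-- pv_equiv track=rewrite | github.com/chauthehan/RECOGNIZE_ID_CARD | tools/score.py | score_expired
-- ===== SOURCE A (Python) =====
-- def score_expired(key):
--     key = key[:15]
--     s = 0
--     for i in {'Co', 'o ', ' g', 'gi', 'ia', 'a ', ' t', 'tr', 'ri',' d', 'de', 'en', 'n:'}:
--         if key.find(i) != -1:
--             s = s+1
--     for i in {'Co ', 'o g', ' gi', 'gia', 'ia ', 'a t', ' tr', 'tri', 'ri ', 'i d', ' de','den','en:'}:
--         if key.find(i) != -1:
--             s = s+3
--     return s
-- ===== SOURCE B (Python) =====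
-- _B2 = {'Co', 'o ', ' g', 'gi', 'ia', 'a ', ' t', 'tr', 'ri', ' d', 'de', 'en', 'n:'}
-- _B3 = {'Co ', 'o g', ' gi', 'gia', 'ia ', 'a t', ' tr', 'tri', 'ri ', 'i d', ' de', 'den', 'en:'}
--
--
-- def _ngrams(s, n):
--     return {s[i:i + n] for i in range(len(s) - (n - 1))}
--
--
-- def score_expired(key):
--     k = key[:15]
--     return len(_B2 & _ngrams(k, 2)) + 3 * len(_B3 & _ngrams(k, 3))
-- ===== Notes on version B (the rewrite author's own statement) =====
-- stated objective: alternative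
-- what changed: Instead of searching the whole truncated key once per pattern with str.find, B scans the key once per n-gram size to build its bigram and trigram sets and returns the sizes of their intersections with the fixed pattern sets.
import Mathlib
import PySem

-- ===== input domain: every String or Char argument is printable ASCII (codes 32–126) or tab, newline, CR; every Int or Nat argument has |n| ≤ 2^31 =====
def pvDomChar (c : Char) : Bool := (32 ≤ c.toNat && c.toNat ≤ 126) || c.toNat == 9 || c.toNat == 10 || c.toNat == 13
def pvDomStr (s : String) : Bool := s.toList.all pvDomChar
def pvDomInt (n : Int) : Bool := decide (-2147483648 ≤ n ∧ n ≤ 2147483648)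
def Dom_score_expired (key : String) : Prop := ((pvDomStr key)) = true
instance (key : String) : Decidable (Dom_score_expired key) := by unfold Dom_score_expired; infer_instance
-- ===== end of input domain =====

-- B replaces a find-per-pattern scan by building the key's bigram/trigram sets once and
-- intersecting them with the fixed pattern sets (alternative decomposition, same cost class).

-- ===== PORT A =====
-- the two Python set literals A iterates over (13 distinct elements each, so the set is the list)
def pvPats2 : PySem.Set (List Char) :=
  PySem.Set.ofList
    ["Co".toList, "o ".toList, " g".toList, "gi".toList, "ia".toList, "a ".toList,
     " t".toList, "tr".toList, "ri".toList, " d".toList, "de".toList, "en".toList, "n:".toList]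

def pvPats3 : PySem.Set (List Char) :=
  PySem.Set.ofList
    ["Co ".toList, "o g".toList, " gi".toList, "gia".toList, "ia ".toList, "a t".toList,
     " tr".toList, "tri".toList, "ri ".toList, "i d".toList, " de".toList, "den".toList, "en:".toList]

def score_expired (key : String) : Int :=
  let k : List Char := PySem.List.slice key.toList none (some 15)   -- key = key[:15]
  let s : Int := pvPats2.foldl (fun s p => if PySem.Chars.find k p ≠ -1 then s + 1 else s) 0
  pvPats3.foldl (fun s p => if PySem.Chars.find k p ≠ -1 then s + 3 else s) s

-- ===== PORT B =====
-- {s[i:i+n] for i in range(len(s)-(n-1))}; range(len-(n-1)) is empty when len < n-1, as in ℕ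
def pvNgrams (s : List Char) (n : Nat) : PySem.Set (List Char) :=
  PySem.Set.ofList
    ((List.range (s.length - (n - 1))).map
      (fun i : Nat => PySem.List.slice s (some (i : Int)) (some ((i : Int) + (n : Int)))))

def score_expired_alt (key : String) : Int :=
  let k : List Char := PySem.List.slice key.toList none (some 15)   -- k = key[:15]
  PySem.Set.len (PySem.Set.inter pvPats2 (pvNgrams k 2))
    + 3 * PySem.Set.len (PySem.Set.inter pvPats3 (pvNgrams k 3))

-- ===== PRECONDITION & SPEC =====
def Spec_score_expired (key : String) (out : Int) : Prop := out = score_expired_alt key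
instance (key : String) (out : Int) : Decidable (Spec_score_expired key out) := by unfold Spec_score_expired; infer_instance

-- ===== CLAIM (what is proved, stated in full; the proofs are below) =====
def Claim_equal_score_expired : Prop := ∀ (key : String), Dom_score_expired key → Spec_score_expired key (score_expired key)

-- ===== LEMMAS AND PROOFS =====

-- a conditional-accumulate fold is init + a * count of hits
theorem pv_foldl_count {α : Type} (c : α → Prop) [DecidablePred c] (a : Int) :
    ∀ (l : List α) (init : Int),
      l.foldl (fun s p => if c p then s + a else s) init
        = init + a * (l.countP (fun p => decide (c p)) : Int) := by
  intro l
  induction l with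
  | nil => intro init; simp
  | cons x xs ih =>
      intro init
      by_cases h : c x <;> simp [List.foldl_cons, h, ih] <;> ring

-- membership in the n-gram set is exactly infix-hood, for patterns of length n
theorem pv_mem_ngrams (s p : List Char) (n : Nat) (hn : 0 < n) (hp : p.length = n) :
    p ∈ pvNgrams s n ↔ p <:+: s := by
  unfold pvNgrams
  rw [PySem.Set.mem_ofList]
  constructor
  · intro hmem
    obtain ⟨i, hi, rfl⟩ := List.mem_map.mp hmem
    rw [PySem.List.slice_natCast_add]
    exact ((List.take_prefix _ _).isInfix).trans (List.drop_suffix _ _).isInfix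
  · rintro ⟨pre, suf, rfl⟩
    refine List.mem_map.mpr ⟨pre.length, List.mem_range.mpr ?_, ?_⟩
    · have h : (pre ++ p ++ suf).length = pre.length + n + suf.length := by
        simp [hp]
        omega
      omega
    · rw [PySem.List.slice_natCast_add]
      rw [List.append_assoc, List.drop_left, ← hp, List.take_left]

theorem pv_contains_ngrams (s p : List Char) (n : Nat) (hn : 0 < n) (hp : p.length = n) :
    PySem.Set.contains (pvNgrams s n) p = decide (PySem.Chars.find s p ≠ -1) := by
  rw [Bool.eq_iff_iff]
  simp only [PySem.Set.contains, List.contains_iff_mem, decide_eq_true_eq]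
  rw [pv_mem_ngrams s p n hn hp]
  rw [Ne, PySem.Chars.find_eq_neg_one_iff]
  tauto

theorem pv_block (s : List Char) (pats : PySem.Set (List Char)) (n : Nat) (a init : Int)
    (hn : 0 < n) (hlen : ∀ p ∈ pats, p.length = n) :
    pats.foldl (fun acc p => if PySem.Chars.find s p ≠ -1 then acc + a else acc) init
      = init + a * PySem.Set.len (PySem.Set.inter pats (pvNgrams s n)) := by
  rw [pv_foldl_count (fun p => PySem.Chars.find s p ≠ -1)]
  congr 2
  simp only [PySem.Set.len, PySem.Set.inter, ← List.countP_eq_length_filter]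
  congr 1
  apply List.countP_congr
  intro p hp
  rw [pv_contains_ngrams s p n hn (hlen p hp)]

-- ===== VERDICT (by name: the statement is the Claim_ definition above) =====
theorem score_expired_spec : Claim_equal_score_expired := by
  intro key _
  unfold Spec_score_expired score_expired score_expired_alt
  simp only []
  rw [pv_block _ pvPats2 2 1 0 (by omega) (by decide),
      pv_block _ pvPats3 3 3 _ (by omega) (by decide)]
  ring
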